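-- pv_equiv track=rewrite | github.com/pypi-data/pypi-mirror-364 | packages/neohubapi/neohubapi-3.1.tar.gz/neohubapi-3.1/neohubapi/neohub.py | _validate_serial_numbers
-- ===== SOURCE A (Python) =====
-- def _validate_serial_numbers(device_sns: dict) -> dict:
--     duplicates = set()
--     for device_id in sorted(device_sns.keys()):
--         info = device_sns[device_id]
--         sn = info["serial_number"]
--         if sn in duplicates:
--             info["serial_number"] = f"{sn}-{device_id}"
--         else:
--             duplicates.add(sn)
--     return device_sns
-- ===== SOURCE B (Python) =====
-- def _validate_serial_numbers(device_sns: dict) -> dict: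
--     # Phase 1: build a keeper index mapping each serial number to the
--     # smallest (first-in-sorted-order) device id that carries it.
--     first_of = {}
--     for device_id in sorted(device_sns.keys()):
--         sn = device_sns[device_id]["serial_number"]
--         if sn not in first_of:
--             first_of[sn] = device_id
--     # Phase 2: rewrite every non-keeper entry in place.
--     for device_id, info in device_sns.items():
--         sn = info["serial_number"]
--         if first_of[sn] != device_id:
--             info["serial_number"] = f"{sn}-{device_id}"
--     return device_sns
-- ===== Notes on version B (the rewrite author's own statement) =====
-- stated objective: alternative
-- what changed: Replaces A's single pass over sorted ids with an in-place rename driven by a growing seen-set by a two-phase algorithm: first build a keeper index (dict serial-number -> first device id in sorted order), then a rewrite pass over the dict items that renames every non-keeper entry.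
import Mathlib
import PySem

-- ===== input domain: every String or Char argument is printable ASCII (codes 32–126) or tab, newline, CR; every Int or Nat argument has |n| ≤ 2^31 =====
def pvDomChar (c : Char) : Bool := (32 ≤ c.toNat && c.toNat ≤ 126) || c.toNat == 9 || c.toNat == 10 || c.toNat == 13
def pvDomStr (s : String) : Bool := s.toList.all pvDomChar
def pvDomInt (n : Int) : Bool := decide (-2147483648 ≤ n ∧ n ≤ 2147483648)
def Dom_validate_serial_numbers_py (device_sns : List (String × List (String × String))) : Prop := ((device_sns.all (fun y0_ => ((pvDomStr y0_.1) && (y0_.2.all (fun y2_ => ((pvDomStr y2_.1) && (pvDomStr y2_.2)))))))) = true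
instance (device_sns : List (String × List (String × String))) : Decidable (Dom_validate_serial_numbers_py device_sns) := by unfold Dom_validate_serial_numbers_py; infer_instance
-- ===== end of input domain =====

-- One line: B replaces A's single sorted pass with a seen-set by a keeper index (serial -> first id) plus a rewrite pass;
-- both mutate the dict in place in Python — the equivalence proved here is about the returned value.

-- shared input/output marshalling (Python dict-of-dicts <-> association lists)
def pvToDict (xs : List (String × List (String × String))) : PySem.Dict String (PySem.Dict String String) :=
  PySem.Dict.ofList (xs.map (fun p => (p.1, PySem.Dict.ofList p.2)))

def pvFromDict (d : PySem.Dict String (PySem.Dict String String)) : List (String × List (String × String)) :=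
  d.items.map (fun p => (p.1, p.2.items))

def pvSn (info : PySem.Dict String String) : String := info.getD "serial_number" ""

-- ===== PORT A =====
-- one loop iteration of A: state = (the mutating dict, the 'duplicates' seen-set)
def pvAStep (st : PySem.Dict String (PySem.Dict String String) × PySem.Set String) (device_id : String) :
    PySem.Dict String (PySem.Dict String String) × PySem.Set String :=
  let info := st.1.getD device_id PySem.Dict.empty
  let sn := pvSn info
  if PySem.Set.contains st.2 sn then
    (st.1.insert device_id (info.insert "serial_number" (sn ++ "-" ++ device_id)), st.2)
  else
    (st.1, PySem.Set.add st.2 sn)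

def validate_serial_numbers_py (device_sns : List (String × List (String × String))) : List (String × List (String × String)) :=
  let d := pvToDict device_sns
  let fin := (PySem.List.sorted d.keys (fun x => x) false).foldl pvAStep (d, PySem.Set.empty)
  pvFromDict fin.1

-- ===== PORT B =====
def validate_serial_numbers_py_alt (device_sns : List (String × List (String × String))) : List (String × List (String × String)) :=
  let d := pvToDict device_sns
  -- phase 1: keeper index, serial number -> first device id in sorted order
  let firstOf := (PySem.List.sorted d.keys (fun x => x) false).foldl
    (fun (f : PySem.Dict String String) device_id =>
      let sn := pvSn (d.getD device_id PySem.Dict.empty)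
      if f.contains sn then f else f.insert sn device_id) PySem.Dict.empty
  -- phase 2: rewrite pass over the items, renaming every non-keeper entry
  let fin := d.items.foldl
    (fun (acc : PySem.Dict String (PySem.Dict String String)) p =>
      let sn := pvSn p.2
      if firstOf.getD sn "" != p.1 then
        acc.insert p.1 (p.2.insert "serial_number" (sn ++ "-" ++ p.1))
      else acc) d
  pvFromDict fin

-- ===== PRECONDITION & SPEC =====
-- Pre_ excludes exactly the inputs on which A raises KeyError: some device's info dict has no "serial_number" key.
def Pre_validate_serial_numbers_py (device_sns : List (String × List (String × String))) : Prop :=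
  ∀ p ∈ (pvToDict device_sns).items, p.2.contains "serial_number" = true
instance (device_sns : List (String × List (String × String))) : Decidable (Pre_validate_serial_numbers_py device_sns) := by unfold Pre_validate_serial_numbers_py; infer_instance

def pvWitness_validate_serial_numbers_py : (List (String × List (String × String))) :=
  [("a", [("serial_number", "X")]), ("b", [("serial_number", "X")]), ("c", [("serial_number", "Y")])]

def Spec_validate_serial_numbers_py (device_sns : List (String × List (String × String))) (out : List (String × List (String × String))) : Prop := out = validate_serial_numbers_py_alt device_sns
instance (device_sns : List (String × List (String × String))) (out : List (String × List (String × String))) : Decidable (Spec_validate_serial_numbers_py device_sns out) := by unfold Spec_validate_serial_numbers_py; infer_instance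

-- ===== CLAIM (what is proved, stated in full; the proofs are below) =====
def Claim_equal_validate_serial_numbers_py : Prop := ∀ (device_sns : List (String × List (String × String))), Dom_validate_serial_numbers_py device_sns → Pre_validate_serial_numbers_py device_sns → Spec_validate_serial_numbers_py device_sns (validate_serial_numbers_py device_sns)

-- ===== LEMMAS AND PROOFS =====

-- abbreviations used only by the proofs
def pvSnI (I : String → PySem.Dict String String) (id : String) : String := pvSn (I id)

def pvG (I : String → PySem.Dict String String) (id : String) : PySem.Dict String String :=
  (I id).insert "serial_number" (pvSnI I id ++ "-" ++ id)

-- the ids A renames, given the seen-set so far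
def pvDupIds (I : String → PySem.Dict String String) (dup : PySem.Set String) : List String → List String
  | [] => []
  | id :: t =>
      if PySem.Set.contains dup (pvSnI I id) then id :: pvDupIds I dup t
      else pvDupIds I (PySem.Set.add dup (pvSnI I id)) t

-- B's phase-1 fold, abstracted over the original-info function
def pvFirstFold (I : String → PySem.Dict String String) (f : PySem.Dict String String) (t : List String) : PySem.Dict String String :=
  t.foldl (fun f id => if f.contains (pvSnI I id) then f else f.insert (pvSnI I id) id) f

lemma pvFirstFold_cons (I : String → PySem.Dict String String) (f : PySem.Dict String String)
    (id : String) (t : List String) :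
    pvFirstFold I f (id :: t) =
      if f.contains (pvSnI I id) then pvFirstFold I f t
      else pvFirstFold I (f.insert (pvSnI I id) id) t := by
  unfold pvFirstFold
  rw [List.foldl_cons]
  by_cases h : f.contains (pvSnI I id) = true <;> simp [h]

lemma set_contains_add (dup : PySem.Set String) (x s : String) :
    PySem.Set.contains (PySem.Set.add dup x) s = (s == x || PySem.Set.contains dup s) := by
  by_cases h : s ∈ PySem.Set.add dup x
  · rw [(PySem.Set.contains_iff _ _).mpr h]
    rcases (PySem.Set.mem_add dup x s).mp h with h2 | h2
    · rw [(PySem.Set.contains_iff dup s).mpr h2]; simp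
    · rw [show (s == x) = true by simp [h2]]; rfl
  · have h1 : PySem.Set.contains (PySem.Set.add dup x) s = false := by
      cases hc : PySem.Set.contains (PySem.Set.add dup x) s
      · rfl
      · exact absurd ((PySem.Set.contains_iff _ _).mp hc) h
    have hne : (s == x) = false := by
      simp only [beq_eq_false_iff_ne]
      exact fun he => h ((PySem.Set.mem_add dup x s).mpr (Or.inr he))
    have h2 : PySem.Set.contains dup s = false := by
      cases hc : PySem.Set.contains dup s
      · rfl
      · exact absurd ((PySem.Set.mem_add dup x s).mpr (Or.inl ((PySem.Set.contains_iff dup s).mp hc))) h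
    rw [h1, hne, h2]
    rfl

lemma set_contains_empty (s : String) : PySem.Set.contains (PySem.Set.empty : PySem.Set String) s = false := by
  cases hc : PySem.Set.contains (PySem.Set.empty : PySem.Set String) s
  · rfl
  · have := (PySem.Set.contains_iff _ _).mp hc
    simp [PySem.Set.empty] at this

lemma pvDupIds_subset (I : String → PySem.Dict String String) :
    ∀ (t : List String) (dup : PySem.Set String) (x : String), x ∈ pvDupIds I dup t → x ∈ t := by
  intro t
  induction t with
  | nil => intro dup x h; simp [pvDupIds] at h
  | cons id t ih =>
      intro dup x h
      by_cases hc : PySem.Set.contains dup (pvSnI I id) = true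
      · simp only [pvDupIds, if_pos hc, List.mem_cons] at h
        rcases h with h | h
        · exact List.mem_cons.mpr (Or.inl h)
        · exact List.mem_cons.mpr (Or.inr (ih _ _ h))
      · simp only [pvDupIds, if_neg hc] at h
        exact List.mem_cons.mpr (Or.inr (ih _ _ h))

lemma foldA_char (I : String → PySem.Dict String String) :
    ∀ (t : List String) (d : PySem.Dict String (PySem.Dict String String)) (dup : PySem.Set String),
      t.Nodup → (∀ id ∈ t, d.get? id = some (I id)) →
      (t.foldl pvAStep (d, dup)).1 = (pvDupIds I dup t).foldl (fun d id => d.insert id (pvG I id)) d := by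
  intro t
  induction t with
  | nil => intro d dup _ _; rfl
  | cons id t ih =>
      intro d dup hnd h
      have hid : d.get? id = some (I id) := h id List.mem_cons_self
      have hinfo : d.getD id PySem.Dict.empty = I id :=
        PySem.Dict.getD_of_get?_eq_some d PySem.Dict.empty hid
      obtain ⟨hnotmem, hnd'⟩ := List.nodup_cons.mp hnd
      have hstep : pvAStep (d, dup) id =
          (if PySem.Set.contains dup (pvSnI I id) then
            (d.insert id (pvG I id), dup)
          else (d, PySem.Set.add dup (pvSnI I id))) := by
        simp only [pvAStep, hinfo, pvG, pvSnI]
      rw [List.foldl_cons, hstep]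
      by_cases hc : PySem.Set.contains dup (pvSnI I id) = true
      · rw [if_pos hc]
        rw [pvDupIds, if_pos hc, List.foldl_cons]
        apply ih _ _ hnd'
        intro j hj
        have hne : j ≠ id := fun he => hnotmem (he ▸ hj)
        rw [PySem.Dict.get?_insert_of_ne _ _ hne]
        exact h j (List.mem_cons_of_mem _ hj)
      · rw [if_neg hc]
        rw [pvDupIds, if_neg hc]
        apply ih _ _ hnd'
        intro j hj
        exact h j (List.mem_cons_of_mem _ hj)

lemma foldl_insert_eq_map {ν : Type} (g : String → ν) :
    ∀ (L : List String) (d : PySem.Dict String ν), d.keys.Nodup → (∀ id ∈ L, d.contains id = true) →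
      (L.foldl (fun d id => d.insert id (g id)) d).items
        = d.items.map (fun p => if p.1 ∈ L then (p.1, g p.1) else p) := by
  intro L
  induction L with
  | nil => intro d hnd hc; simp
  | cons id t ih =>
      intro d hnd hcont
      have hcid : d.contains id = true := hcont id List.mem_cons_self
      rw [List.foldl_cons]
      rw [ih (d.insert id (g id))
          (by rw [PySem.Dict.keys_insert_of_contains d (g id) hcid]; exact hnd)
          (by intro j hj
              rw [PySem.Dict.contains_insert]
              rw [hcont j (List.mem_cons_of_mem _ hj)]
              simp)]
      rw [PySem.Dict.items_insert_of_contains d (g id) hcid, List.map_map]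
      apply List.map_congr_left
      intro p _
      by_cases hpe : p.1 = id
      · simp only [Function.comp, hpe, beq_self_eq_true, if_pos, List.mem_cons, true_or]
        by_cases ht : id ∈ t <;> simp [ht]
      · have hbe : (p.1 == id) = false := by simp [hpe]
        simp only [Function.comp, hbe, Bool.false_eq_true, if_false, List.mem_cons]
        by_cases ht : p.1 ∈ t <;> simp [ht, hpe]

lemma foldl_if_filter {α β : Type} (C : α → Bool) (f : β → α → β) :
    ∀ (l : List α) (acc : β),
      l.foldl (fun b a => if C a then f b a else b) acc = (l.filter C).foldl f acc := by
  intro l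
  induction l with
  | nil => intro acc; rfl
  | cons a l ih =>
      intro acc
      by_cases hc : C a = true
      · simp [hc, ih]
      · simp only [Bool.not_eq_true] at hc
        simp [hc, ih]

lemma pvFirstFold_preserves (I : String → PySem.Dict String String) :
    ∀ (t : List String) (f : PySem.Dict String String) (s v : String),
      f.get? s = some v → (pvFirstFold I f t).get? s = some v := by
  intro t
  induction t with
  | nil => intro f s v h; exact h
  | cons id t ih =>
      intro f s v h
      rw [pvFirstFold_cons]
      by_cases hc : f.contains (pvSnI I id) = true
      · rw [if_pos hc]; exact ih _ _ _ h
      · rw [if_neg hc]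
        apply ih
        have hne : s ≠ pvSnI I id := by
          intro hEq
          rw [hEq] at h
          have hcon := PySem.Dict.contains_eq_isSome_get? f (pvSnI I id)
          rw [h] at hcon
          simp [hcon] at hc
        rw [PySem.Dict.get?_insert_of_ne _ _ hne]; exact h

lemma dup_first_link (I : String → PySem.Dict String String) :
    ∀ (t : List String) (dup : PySem.Set String) (f : PySem.Dict String String),
      t.Nodup →
      (∀ s, PySem.Set.contains dup s = f.contains s) →
      (∀ s v, f.get? s = some v → v ∉ t) →
      ∀ id ∈ t, (id ∈ pvDupIds I dup t ↔ (pvFirstFold I f t).getD (pvSnI I id) "" ≠ id) := by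
  intro t
  induction t with
  | nil => intro dup f _ _ _ id hid; exact absurd hid (List.not_mem_nil)
  | cons id t ih =>
      intro dup f hnd hlink hval j hj
      obtain ⟨hnotmem, hnd'⟩ := List.nodup_cons.mp hnd
      rw [pvFirstFold_cons]
      by_cases hc : PySem.Set.contains dup (pvSnI I id) = true
      · have hfc : f.contains (pvSnI I id) = true := by rw [← hlink]; exact hc
        rw [if_pos hfc]
        rw [pvDupIds, if_pos hc]
        rcases List.mem_cons.mp hj with hji | hjt
        · subst hji
          constructor
          · intro _
            have hsome := PySem.Dict.contains_eq_isSome_get? f (pvSnI I j)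
            rw [hfc] at hsome
            cases hv : f.get? (pvSnI I j) with
            | none => rw [hv] at hsome; simp at hsome
            | some v =>
                have hpres := pvFirstFold_preserves I t f _ _ hv
                rw [PySem.Dict.getD_of_get?_eq_some _ "" hpres]
                intro he
                exact hval _ _ hv (he ▸ List.mem_cons_self)
          · intro _; exact List.mem_cons_self
        · have := ih dup f hnd' hlink
            (fun s v hv => fun hmem => hval s v hv (List.mem_cons_of_mem _ hmem)) j hjt
          rw [← this]
          constructor
          · intro hm
            rcases List.mem_cons.mp hm with h1 | h1
            · exact absurd (h1 ▸ hjt) hnotmem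
            · exact h1
          · intro hm; exact List.mem_cons.mpr (Or.inr hm)
      · have hfc : f.contains (pvSnI I id) = false := by
          rw [← hlink]; exact Bool.not_eq_true _ ▸ (by simpa using hc)
        rw [if_neg (by simp [hfc])]
        rw [pvDupIds, if_neg hc]
        rcases List.mem_cons.mp hj with hji | hjt
        · subst hji
          constructor
          · intro hm
            exact absurd (pvDupIds_subset I t _ _ hm) hnotmem
          · intro hne
            exfalso
            apply hne
            have hins : (f.insert (pvSnI I j) j).get? (pvSnI I j) = some j :=
              PySem.Dict.get?_insert_self _ _ _
            have hpres := pvFirstFold_preserves I t _ _ _ hins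
            rw [PySem.Dict.getD_of_get?_eq_some _ "" hpres]
        · apply ih _ _ hnd'
          · intro s
            rw [set_contains_add, PySem.Dict.contains_insert, hlink]
          · intro s v hv
            rw [PySem.Dict.get?_insert] at hv
            by_cases hs : s = pvSnI I id
            · rw [if_pos hs] at hv
              have : v = id := by injection hv with h'; exact h'.symm
              subst this
              exact hnotmem
            · rw [if_neg hs] at hv
              exact fun hmem => hval s v hv (List.mem_cons_of_mem _ hmem)
          · exact hjt


def pvI (d : PySem.Dict String (PySem.Dict String String)) : String → PySem.Dict String String :=
  fun id => d.getD id PySem.Dict.empty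

lemma main_core (d : PySem.Dict String (PySem.Dict String String)) (hnd : d.keys.Nodup) :
    ((PySem.List.sorted d.keys (fun x => x) false).foldl pvAStep (d, PySem.Set.empty)).1.items
      = (d.items.foldl (fun acc p =>
      if ((PySem.List.sorted d.keys (fun x => x) false).foldl
            (fun f device_id => if f.contains (pvSn (d.getD device_id PySem.Dict.empty)) then f
                         else f.insert (pvSn (d.getD device_id PySem.Dict.empty)) device_id)
            PySem.Dict.empty).getD (pvSn p.2) "" != p.1
      then acc.insert p.1 (p.2.insert "serial_number" (pvSn p.2 ++ "-" ++ p.1))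
      else acc) d).items := by
  set ks := PySem.List.sorted d.keys (fun x => x) false with hksdef
  have hknd : ks.Nodup := ((PySem.List.sorted_perm d.keys (fun x => x) false).nodup_iff).mpr hnd
  have hmemks : ∀ id : String, id ∈ ks ↔ id ∈ d.keys := fun id =>
    PySem.List.mem_sorted d.keys (fun x => x) false id
  have hget : ∀ id ∈ ks, d.get? id = some (pvI d id) := by
    intro id hid
    have hc : d.contains id = true := (PySem.Dict.contains_iff_mem_keys d id).mpr ((hmemks id).mp hid)
    rw [PySem.Dict.contains_eq_isSome_get?] at hc
    cases hv : d.get? id with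
    | none => rw [hv] at hc; simp at hc
    | some v =>
        rw [show pvI d id = v from PySem.Dict.getD_of_get?_eq_some d PySem.Dict.empty hv]
  -- A side
  set LA := pvDupIds (pvI d) PySem.Set.empty ks with hLAdef
  have a1 : (ks.foldl pvAStep (d, PySem.Set.empty)).1
      = LA.foldl (fun acc id => acc.insert id (pvG (pvI d) id)) d := by
    rw [hLAdef]
    exact foldA_char (pvI d) ks d PySem.Set.empty hknd hget
  have hsubA : ∀ id ∈ LA, d.contains id = true := by
    intro id hid
    exact (PySem.Dict.contains_iff_mem_keys d id).mpr
      ((hmemks id).mp (pvDupIds_subset (pvI d) ks PySem.Set.empty id hid))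
  have a2 : (LA.foldl (fun acc id => acc.insert id (pvG (pvI d) id)) d).items
      = d.items.map (fun p => if p.1 ∈ LA then (p.1, pvG (pvI d) p.1) else p) :=
    foldl_insert_eq_map (pvG (pvI d)) LA d hnd hsubA
  -- B side
  set FF := pvFirstFold (pvI d) PySem.Dict.empty ks with hFFdef
  set C : (String × PySem.Dict String String) → Bool :=
    (fun p => FF.getD (pvSn p.2) "" != p.1) with hCdef
  set fstep : PySem.Dict String (PySem.Dict String String) → (String × PySem.Dict String String) → PySem.Dict String (PySem.Dict String String) :=
    (fun acc p => acc.insert p.1 (p.2.insert "serial_number" (pvSn p.2 ++ "-" ++ p.1))) with hfdef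
  have e1 : (d.items.foldl (fun acc p =>
      if ((PySem.List.sorted d.keys (fun x => x) false).foldl
            (fun f device_id => if f.contains (pvSn (d.getD device_id PySem.Dict.empty)) then f
                         else f.insert (pvSn (d.getD device_id PySem.Dict.empty)) device_id)
            PySem.Dict.empty).getD (pvSn p.2) "" != p.1
      then acc.insert p.1 (p.2.insert "serial_number" (pvSn p.2 ++ "-" ++ p.1))
      else acc) d) = (d.items.filter C).foldl fstep d :=
    foldl_if_filter C fstep d.items d
  have hIp : ∀ p ∈ d.items, pvI d p.1 = p.2 := by
    intro p hp
    have hpp : (p.1, p.2) ∈ d.items := by simpa using hp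
    exact PySem.Dict.getD_of_get?_eq_some d PySem.Dict.empty
      (PySem.Dict.get?_of_mem_items d hpp hnd)
  set LB := (d.items.filter C).map Prod.fst with hLBdef
  have e2 : (d.items.filter C).foldl fstep d
      = LB.foldl (fun acc id => acc.insert id (pvG (pvI d) id)) d := by
    rw [hLBdef, List.foldl_map]
    apply PySem.List.foldl_congr_mem
    intro acc p hp
    have hpi : p ∈ d.items := (List.mem_filter.mp hp).1
    rw [hfdef]
    show acc.insert p.1 (p.2.insert "serial_number" (pvSn p.2 ++ "-" ++ p.1))
        = acc.insert p.1 (pvG (pvI d) p.1)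
    rw [pvG, pvSnI, hIp p hpi]
  have hsubB : ∀ id ∈ LB, d.contains id = true := by
    intro id hid
    obtain ⟨q, hqf, hq1⟩ := List.mem_map.mp hid
    have hqi : q ∈ d.items := (List.mem_filter.mp hqf).1
    exact hq1 ▸ (PySem.Dict.contains_iff_mem_keys d q.1).mpr (PySem.Dict.mem_keys_of_mem_items d hqi)
  have e3 : (LB.foldl (fun acc id => acc.insert id (pvG (pvI d) id)) d).items
      = d.items.map (fun p => if p.1 ∈ LB then (p.1, pvG (pvI d) p.1) else p) :=
    foldl_insert_eq_map (pvG (pvI d)) LB d hnd hsubB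
  -- the two rename sets coincide on the items
  have hpw : d.items.Pairwise (fun a b => a.1 ≠ b.1) := by
    have hnd' : (d.items.map (fun p => p.1)).Nodup := hnd
    exact List.pairwise_map.mp hnd'
  have hcongr : d.items.map (fun p => if p.1 ∈ LA then (p.1, pvG (pvI d) p.1) else p)
      = d.items.map (fun p => if p.1 ∈ LB then (p.1, pvG (pvI d) p.1) else p) := by
    apply List.map_congr_left
    intro p hp
    have hp1ks : p.1 ∈ ks := (hmemks p.1).mpr (PySem.Dict.mem_keys_of_mem_items d hp)
    have hlink := dup_first_link (pvI d) ks PySem.Set.empty PySem.Dict.empty hknd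
      (fun s => by rw [set_contains_empty, PySem.Dict.contains_empty])
      (fun s v hv => by rw [PySem.Dict.get?_empty] at hv; exact absurd hv (by simp))
      p.1 hp1ks
    have hCp : (C p = true) ↔ (FF.getD (pvSnI (pvI d) p.1) "" ≠ p.1) := by
      rw [hCdef]
      show (FF.getD (pvSn p.2) "" != p.1) = true ↔ _
      rw [pvSnI, hIp p hp]
      exact bne_iff_ne
    have hLBmem : p.1 ∈ LB ↔ C p = true := by
      constructor
      · intro h
        obtain ⟨q, hqf, hq1⟩ := List.mem_map.mp h
        obtain ⟨hqi, hqC⟩ := List.mem_filter.mp hqf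
        have hqp : q = p := by
          by_contra hne
          exact hpw.forall (fun _ _ h => h.symm) hqi hp hne hq1
        rw [← hqp]; exact hqC
      · intro h
        exact List.mem_map.mpr ⟨p, List.mem_filter.mpr ⟨hp, h⟩, rfl⟩
    have hiff : p.1 ∈ LA ↔ p.1 ∈ LB := by
      rw [hLAdef, hlink, hLBmem, hCp]
    by_cases hA : p.1 ∈ LA
    · rw [if_pos hA, if_pos (hiff.mp hA)]
    · rw [if_neg hA, if_neg (fun h => hA (hiff.mpr h))]
  calc ((ks.foldl pvAStep (d, PySem.Set.empty)).1).items
      = (LA.foldl (fun acc id => acc.insert id (pvG (pvI d) id)) d).items := by rw [a1]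
    _ = d.items.map (fun p => if p.1 ∈ LA then (p.1, pvG (pvI d) p.1) else p) := a2
    _ = d.items.map (fun p => if p.1 ∈ LB then (p.1, pvG (pvI d) p.1) else p) := hcongr
    _ = (LB.foldl (fun acc id => acc.insert id (pvG (pvI d) id)) d).items := e3.symm
    _ = ((d.items.filter C).foldl fstep d).items := by rw [e2]
    _ = (d.items.foldl (fun acc p =>
      if ((PySem.List.sorted d.keys (fun x => x) false).foldl
            (fun f device_id => if f.contains (pvSn (d.getD device_id PySem.Dict.empty)) then f
                         else f.insert (pvSn (d.getD device_id PySem.Dict.empty)) device_id)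
            PySem.Dict.empty).getD (pvSn p.2) "" != p.1
      then acc.insert p.1 (p.2.insert "serial_number" (pvSn p.2 ++ "-" ++ p.1))
      else acc) d).items := by rw [e1]

-- ===== VERDICT (by name: the statement is the Claim_ definition above) =====
theorem validate_serial_numbers_py_spec : Claim_equal_validate_serial_numbers_py := by
  intro device_sns _hdom _hpre
  exact congrArg
    (fun l : List (String × PySem.Dict String String) => l.map (fun p => (p.1, p.2.items)))
    (main_core (pvToDict device_sns) (PySem.Dict.nodup_keys_ofList _))
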